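-- pv_equiv track=rewrite | github.com/EmboMaster/EmboMatrix | omnigibson/plannerdemo/simulation_tools/presample_2d_pose_selfused_v2.py | get_all_multi_goals
-- ===== SOURCE A (Python) =====
-- def get_all_multi_goals(goals):
--     relation_goals = [goal for goal in goals if goal[0] in ('inside', 'ontop')]
--     objs1 = [goal[1] for goal in relation_goals]
--     objs2 = [goal[2] for goal in relation_goals]
--     middle_objs = [obj for obj in objs1 if obj in objs2]
--     multi_goals = []
--     for middle_obj in middle_objs:
--         for relation_goal in relation_goals:
--             if relation_goal[1] == middle_obj:
--                 multi_goal_1 = relation_goal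
--             if relation_goal[2] == middle_obj:
--                 multi_goal_2 = relation_goal
--         multi_goal = [multi_goal_1, multi_goal_2]
--         multi_goals.append(multi_goal)
--     for multi_goal in multi_goals:
--         goals = [goal for goal in goals if goal not in multi_goal]
--     return multi_goals, goals
-- ===== SOURCE B (Python) =====
-- def get_all_multi_goals(goals):
--     relation_goals = [goal for goal in goals if goal[0] in ('inside', 'ontop')]
--     last1 = {}  # obj -> last relation goal with goal[1] == obj
--     last2 = {}  # obj -> last relation goal with goal[2] == obj
--     for goal in relation_goals:
--         last1[goal[1]] = goal
--         last2[goal[2]] = goal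
--     multi_goals = [[last1[goal[1]], last2[goal[1]]]
--                    for goal in relation_goals if goal[1] in last2]
--     removed = {tuple(x) for mg in multi_goals for x in mg}
--     return multi_goals, [goal for goal in goals if tuple(goal) not in removed]
-- ===== Notes on version B (the rewrite author's own statement) =====
-- stated objective: alternative
-- what changed: Replaces the per-middle-object rescans of the relation list and the repeated whole-list removal filters by two dicts built in one pass (object -> last goal matching in position 1/2) and a single set-based final filter; same result, different traversal (worst case O(M*R) becomes O(R)), no measured speed-up on the generated inputs.
import Mathlib
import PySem

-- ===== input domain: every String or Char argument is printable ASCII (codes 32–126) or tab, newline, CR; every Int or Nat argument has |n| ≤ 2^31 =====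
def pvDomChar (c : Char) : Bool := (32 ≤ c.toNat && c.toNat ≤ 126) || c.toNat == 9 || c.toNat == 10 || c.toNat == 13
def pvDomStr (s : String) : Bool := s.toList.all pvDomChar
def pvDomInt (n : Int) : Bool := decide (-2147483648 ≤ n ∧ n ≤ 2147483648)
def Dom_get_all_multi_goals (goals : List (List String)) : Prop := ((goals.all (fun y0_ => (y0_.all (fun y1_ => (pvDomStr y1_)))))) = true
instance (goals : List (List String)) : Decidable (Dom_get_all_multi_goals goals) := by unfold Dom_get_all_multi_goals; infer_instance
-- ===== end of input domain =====

-- B replaces A's per-middle-object rescans and repeated removal filters by two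
-- last-match dicts built in one pass and a single set-based final filter.

-- xs[i] on an index guaranteed in range by Pre_ (default never used inside Pre_)
def pyAt (g : List String) (i : Int) : String := (PySem.List.pyGet? g i).getD ""

-- ===== PORT A =====
def get_all_multi_goals (goals : List (List String)) : List (List (List String)) × List (List String) :=
  let relation_goals := goals.filter (fun goal => pyAt goal 0 == "inside" || pyAt goal 0 == "ontop")
  let objs1 := relation_goals.map (fun goal => pyAt goal 1)
  let objs2 := relation_goals.map (fun goal => pyAt goal 2)
  let middle_objs := objs1.filter (fun obj => objs2.contains obj)
  -- outer loop; multi_goal_1 / multi_goal_2 persist across iterations (Options, none = not yet assigned)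
  let st := middle_objs.foldl
      (fun (st : List (List (List String)) × Option (List String) × Option (List String)) middle_obj =>
        let m := relation_goals.foldl
          (fun (m : Option (List String) × Option (List String)) relation_goal =>
            let m1 := if pyAt relation_goal 1 == middle_obj then some relation_goal else m.1
            let m2 := if pyAt relation_goal 2 == middle_obj then some relation_goal else m.2
            (m1, m2))
          st.2
        (st.1 ++ [[m.1.getD [], m.2.getD []]], m))
      ([], none, none)
  let multi_goals := st.1
  let goals := multi_goals.foldl
      (fun gs multi_goal => gs.filter (fun goal => !(multi_goal.contains goal))) goals
  (multi_goals, goals)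

-- ===== PORT B =====
def get_all_multi_goals_alt (goals : List (List String)) : List (List (List String)) × List (List String) :=
  let relation_goals := goals.filter (fun goal => pyAt goal 0 == "inside" || pyAt goal 0 == "ontop")
  let ds := relation_goals.foldl
      (fun (ds : PySem.Dict String (List String) × PySem.Dict String (List String)) goal =>
        (ds.1.insert (pyAt goal 1) goal, ds.2.insert (pyAt goal 2) goal))
      (PySem.Dict.empty, PySem.Dict.empty)
  let last1 := ds.1
  let last2 := ds.2
  let multi_goals := (relation_goals.filter (fun goal => last2.contains (pyAt goal 1))).map
      (fun goal => [last1.getD (pyAt goal 1) [], last2.getD (pyAt goal 1) []])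
  let removed := PySem.Set.ofList (multi_goals.flatMap (fun mg => mg))
  (multi_goals, goals.filter (fun goal => !(PySem.Set.contains removed goal)))

-- ===== PRECONDITION & SPEC =====
-- Pre_ excludes exactly the inputs on which A raises IndexError: an empty goal
-- (goal[0]) or a relation goal ('inside'/'ontop') shorter than 3 (goal[1]/goal[2]).
def Pre_get_all_multi_goals (goals : List (List String)) : Prop :=
  ∀ g ∈ goals, g ≠ [] ∧ ((pyAt g 0 = "inside" ∨ pyAt g 0 = "ontop") → 3 ≤ g.length)
instance (goals : List (List String)) : Decidable (Pre_get_all_multi_goals goals) := by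
  unfold Pre_get_all_multi_goals; infer_instance
def pvWitness_get_all_multi_goals : List (List String) :=
  [["inside", "a", "b"], ["ontop", "b", "c"], ["touch", "a"]]
def Spec_get_all_multi_goals (goals : List (List String)) (out : List (List (List String)) × List (List String)) : Prop := out = get_all_multi_goals_alt goals
instance (goals : List (List String)) (out : List (List (List String)) × List (List String)) : Decidable (Spec_get_all_multi_goals goals out) := by unfold Spec_get_all_multi_goals; infer_instance

-- ===== CLAIM (what is proved, stated in full; the proofs are below) =====
def Claim_equal_get_all_multi_goals : Prop := ∀ (goals : List (List String)), Dom_get_all_multi_goals goals → Pre_get_all_multi_goals goals → Spec_get_all_multi_goals goals (get_all_multi_goals goals)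

-- ===== LEMMAS AND PROOFS =====

-- 'last assignment under a test' loop = last element of the filtered list (or the initial value)
theorem foldl_lastIf {α : Type} (p : α → Bool) (l : List α) (init : Option α) :
    l.foldl (fun m x => if p x then some x else m) init = ((l.filter p).getLast?).or init := by
  induction l using List.reverseRecOn generalizing init with
  | nil => simp
  | append_singleton l x ih =>
      rw [List.foldl_append, List.filter_append]
      by_cases h : p x = true
      · simp [h]
      · simp only [Bool.not_eq_true] at h
        simp [h, ih]

-- lookup in a dict built by 'for g in l: d[k g] = g' = last element of l with that key
theorem get?_foldl_insert {α : Type} (k : α → String) (l : List α)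
    (d : PySem.Dict String α) (o : String) :
    (l.foldl (fun d g => d.insert (k g) g) d).get? o
      = ((l.filter (fun g => k g == o)).getLast?).or (d.get? o) := by
  induction l using List.reverseRecOn generalizing d with
  | nil => simp
  | append_singleton l x ih =>
      rw [List.foldl_append, List.filter_append]
      simp only [List.foldl_cons, List.foldl_nil]
      rw [PySem.Dict.get?_insert]
      by_cases h : o = k x
      · simp [h]
      · have h' : (k x == o) = false := by simp; exact fun e => h e.symm
        simp [h, h', ih]

-- repeated 'goals = [g for g in goals if g not in mg]' = one filter over the conjunction
theorem foldl_filter_not_contains {α : Type} [BEq α] (mgs : List (List α)) (gs : List α) :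
    mgs.foldl (fun gs mg => gs.filter (fun g => !(mg.contains g))) gs
      = gs.filter (fun g => !(mgs.any (fun mg => mg.contains g))) := by
  induction mgs generalizing gs with
  | nil => simp
  | cons mg mgs ih =>
      rw [List.foldl_cons, ih, List.filter_filter]
      congr 1
      funext g
      simp [Bool.and_comm]

-- A's outer loop over middle objects, given that both filters are nonempty for each of them
theorem outer_loop_eq {rel : List (List String)} (mos : List String) :
    (∀ o ∈ mos, (rel.filter (fun g => pyAt g 1 == o)) ≠ [] ∧
                (rel.filter (fun g => pyAt g 2 == o)) ≠ []) →
    ∀ (acc : List (List (List String))) (m : Option (List String) × Option (List String)),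
    (mos.foldl
      (fun (st : List (List (List String)) × Option (List String) × Option (List String)) middle_obj =>
        let m := rel.foldl
          (fun (m : Option (List String) × Option (List String)) relation_goal =>
            let m1 := if pyAt relation_goal 1 == middle_obj then some relation_goal else m.1
            let m2 := if pyAt relation_goal 2 == middle_obj then some relation_goal else m.2
            (m1, m2))
          st.2
        (st.1 ++ [[m.1.getD [], m.2.getD []]], m))
      (acc, m)).1
    = acc ++ mos.map (fun o =>
        [((rel.filter (fun g => pyAt g 1 == o)).getLast?).getD [],
         ((rel.filter (fun g => pyAt g 2 == o)).getLast?).getD []]) := by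
  induction mos with
  | nil => intro _ acc m; simp
  | cons o mos ih =>
      intro h acc m
      obtain ⟨h1, h2⟩ := h o (by simp)
      have hmos := fun o' ho' => h o' (List.mem_cons_of_mem _ ho')
      obtain ⟨m1, m2⟩ := m
      rw [List.foldl_cons]
      dsimp only
      rw [PySem.List.foldl_prod_mk
            (f := fun a relation_goal => if pyAt relation_goal 1 == o then some relation_goal else a)
            (g := fun a relation_goal => if pyAt relation_goal 2 == o then some relation_goal else a),
          foldl_lastIf, foldl_lastIf]
      cases e1 : (rel.filter (fun g => pyAt g 1 == o)).getLast? with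
      | none => exact absurd (List.getLast?_eq_none_iff.mp e1) h1
      | some x1 =>
        cases e2 : (rel.filter (fun g => pyAt g 2 == o)).getLast? with
        | none => exact absurd (List.getLast?_eq_none_iff.mp e2) h2
        | some x2 =>
          rw [ih hmos, List.map_cons, e1, e2]
          simp only [Option.some_or, Option.getD_some, List.append_assoc, List.cons_append,
            List.nil_append]

-- the two projections of the inserted goal lists agree with the last-match characterisations
theorem main_eq (goals : List (List String)) :
    get_all_multi_goals goals = get_all_multi_goals_alt goals := by
  unfold get_all_multi_goals get_all_multi_goals_alt
  dsimp only
  rw [PySem.List.foldl_prod_mk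
        (f := fun d goal => PySem.Dict.insert d (pyAt goal 1) goal)
        (g := fun d goal => PySem.Dict.insert d (pyAt goal 2) goal)]
  set rel := goals.filter (fun goal => pyAt goal 0 == "inside" || pyAt goal 0 == "ontop") with hrel
  have hget1 : ∀ o, (rel.foldl (fun d g => d.insert (pyAt g 1) g) PySem.Dict.empty).get? o
      = (rel.filter (fun g => pyAt g 1 == o)).getLast? := by
    intro o; rw [get?_foldl_insert (k := fun g => pyAt g 1)]; simp
  have hget2 : ∀ o, (rel.foldl (fun d g => d.insert (pyAt g 2) g) PySem.Dict.empty).get? o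
      = (rel.filter (fun g => pyAt g 2 == o)).getLast? := by
    intro o; rw [get?_foldl_insert (k := fun g => pyAt g 2)]; simp
  have hcont : ∀ o, (rel.foldl (fun d g => d.insert (pyAt g 2) g) PySem.Dict.empty).contains o
      = (rel.map (fun g => pyAt g 2)).contains o := by
    intro o
    rw [PySem.Dict.contains_eq_isSome_get?, hget2, Bool.eq_iff_iff,
        List.getLast?_isSome, List.contains_iff_mem]
    simp only [ne_eq, List.filter_eq_nil_iff, List.mem_map, not_forall, not_not,
      beq_iff_eq]
    constructor
    · rintro ⟨a, ha, he⟩; exact ⟨a, ha, he⟩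
    · rintro ⟨a, ha, he⟩; exact ⟨a, ha, he⟩
  have hok : ∀ o ∈ (rel.map (fun g => pyAt g 1)).filter
        (fun obj => (rel.map (fun g => pyAt g 2)).contains obj),
      (rel.filter (fun g => pyAt g 1 == o)) ≠ [] ∧ (rel.filter (fun g => pyAt g 2 == o)) ≠ [] := by
    intro o ho
    obtain ⟨ho1, ho2⟩ := List.mem_filter.mp ho
    obtain ⟨a, ha, he⟩ := List.mem_map.mp ho1
    obtain ⟨b, hb, hf⟩ := List.mem_map.mp (List.contains_iff_mem.mp ho2)
    constructor
    · exact List.ne_nil_of_mem (List.mem_filter.mpr ⟨ha, by simp [he]⟩)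
    · exact List.ne_nil_of_mem (List.mem_filter.mpr ⟨hb, by simp [hf]⟩)
  have hmulti :
      ((((rel.map (fun g => pyAt g 1)).filter
          (fun obj => (rel.map (fun g => pyAt g 2)).contains obj)).foldl
        (fun (st : List (List (List String)) × Option (List String) × Option (List String)) middle_obj =>
          let m := rel.foldl
            (fun (m : Option (List String) × Option (List String)) relation_goal =>
              let m1 := if pyAt relation_goal 1 == middle_obj then some relation_goal else m.1
              let m2 := if pyAt relation_goal 2 == middle_obj then some relation_goal else m.2
              (m1, m2))
            st.2
          (st.1 ++ [[m.1.getD [], m.2.getD []]], m))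
        ([], none, none)).1)
      = (rel.filter (fun goal =>
          (rel.foldl (fun d g => d.insert (pyAt g 2) g) PySem.Dict.empty).contains (pyAt goal 1))).map
          (fun goal =>
            [(rel.foldl (fun d g => d.insert (pyAt g 1) g) PySem.Dict.empty).getD (pyAt goal 1) [],
             (rel.foldl (fun d g => d.insert (pyAt g 2) g) PySem.Dict.empty).getD (pyAt goal 1) []]) := by
    rw [outer_loop_eq _ hok [] (none, none), List.nil_append, List.filter_map, List.map_map]
    have hfil : rel.filter (fun goal =>
          (rel.foldl (fun d g => d.insert (pyAt g 2) g) PySem.Dict.empty).contains (pyAt goal 1))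
        = rel.filter ((fun obj => (rel.map (fun g => pyAt g 2)).contains obj) ∘ (fun g => pyAt g 1)) :=
      List.filter_congr (fun g _ => hcont (pyAt g 1))
    rw [hfil]
    refine List.map_congr_left (fun g hg => ?_)
    simp only [Function.comp_apply]
    rw [PySem.Dict.getD_eq_get?_getD, PySem.Dict.getD_eq_get?_getD, hget1, hget2]
  rw [hmulti, foldl_filter_not_contains]
  refine congrArg _ (List.filter_congr (fun g _ => ?_))
  rw [Bool.eq_iff_iff]
  simp [PySem.Set.mem_ofList]

-- ===== VERDICT (by name: the statement is the Claim_ definition above) =====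
theorem get_all_multi_goals_spec : Claim_equal_get_all_multi_goals := by
  intro goals _ _
  exact main_eq goals
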